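-- pv_equiv track=rewrite | github.com/fhiyo/atcoder-training | src/py3/042-d/042-d.py | factorialMod
-- ===== SOURCE A (Python) =====
-- def factorialMod(x, mod):
--     """Calculate modulo of funcotial 'x'."""
--     assert isinstance(x, int)
--     assert x >= 0
--     assert isinstance(mod, int)
--     assert mod >= 0
--
--     if x == 0:
--         return 1
--     return (x % mod) * factorialMod(x - 1, mod)
-- ===== SOURCE B (Python) =====
-- def factorialMod(x, mod):
--     """Calculate modulo of funcotial 'x'."""
--     assert isinstance(x, int)
--     assert x >= 0
--     assert isinstance(mod, int)
--     assert mod >= 0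
--
--     result = 1
--     for i in range(1, x + 1):
--         result *= i % mod
--     return result
-- ===== Notes on version B (the rewrite author's own statement) =====
-- stated objective: alternative
-- what changed: Replaces the x-deep recursion with an iterative accumulator loop over range(1, x+1) (empty product 1 for x == 0), producing the identical bignum with no final reduction.
import Mathlib
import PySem

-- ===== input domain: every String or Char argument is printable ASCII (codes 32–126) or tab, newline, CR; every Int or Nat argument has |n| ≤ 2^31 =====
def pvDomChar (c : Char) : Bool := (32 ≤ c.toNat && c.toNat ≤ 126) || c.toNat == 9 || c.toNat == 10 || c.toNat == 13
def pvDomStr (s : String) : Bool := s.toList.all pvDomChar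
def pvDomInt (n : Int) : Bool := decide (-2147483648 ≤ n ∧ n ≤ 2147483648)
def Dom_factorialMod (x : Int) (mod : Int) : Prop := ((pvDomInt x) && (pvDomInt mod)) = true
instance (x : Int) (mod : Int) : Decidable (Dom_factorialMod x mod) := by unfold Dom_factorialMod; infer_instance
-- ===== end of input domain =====

-- B replaces the x-deep recursion by an iterative accumulator loop over range(1, x+1); same exact bignum value.

-- ===== PORT A =====
-- Python tests x == 0; the ≤ guard only makes the recursion total (Pre_ keeps x ≥ 0, where both coincide).
def factorialMod (x : Int) (mod : Int) : Int :=
  if x ≤ 0 then 1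
  else PySem.Int.mod x mod * factorialMod (x - 1) mod
termination_by x.toNat
decreasing_by omega

-- ===== PORT B =====
def factorialMod_alt (x : Int) (mod : Int) : Int :=
  (PySem.List.pyRange 1 (x + 1) 1).foldl (fun result i => result * PySem.Int.mod i mod) 1

-- ===== PRECONDITION & SPEC =====
-- Pre_ excludes exactly the inputs where Python A raises: x < 0 or mod < 0 (AssertionError),
-- and mod = 0 with x ≥ 1 (ZeroDivisionError).
def Pre_factorialMod (x : Int) (mod : Int) : Prop := 0 ≤ x ∧ 0 ≤ mod ∧ (x = 0 ∨ mod ≠ 0)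
instance (x : Int) (mod : Int) : Decidable (Pre_factorialMod x mod) := by unfold Pre_factorialMod; infer_instance
def pvWitness_factorialMod : Int × Int := (4, 3)

def Spec_factorialMod (x : Int) (mod : Int) (out : Int) : Prop := out = factorialMod_alt x mod
instance (x : Int) (mod : Int) (out : Int) : Decidable (Spec_factorialMod x mod out) := by unfold Spec_factorialMod; infer_instance

-- ===== CLAIM =====
def Claim_equal_factorialMod : Prop := ∀ (x : Int) (mod : Int), Dom_factorialMod x mod → Pre_factorialMod x mod → Spec_factorialMod x mod (factorialMod x mod)

-- ===== LEMMAS AND PROOFS =====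
theorem factorialMod_eq_alt_nat (n : Nat) (mod : Int) :
    factorialMod (n : Int) mod = factorialMod_alt (n : Int) mod := by
  induction n with
  | zero =>
      simp [factorialMod, factorialMod_alt]
  | succ n ih =>
      rw [factorialMod]
      have hpos : ¬ ((n + 1 : Nat) : Int) ≤ 0 := by push_cast; omega
      rw [if_neg hpos]
      have hstep : ((n + 1 : Nat) : Int) - 1 = (n : Int) := by push_cast; ring
      rw [hstep, ih]
      unfold factorialMod_alt
      have hrange : PySem.List.pyRange 1 (((n + 1 : Nat) : Int) + 1) 1
          = PySem.List.pyRange 1 ((n : Int) + 1) 1 ++ [((n : Int) + 1)] := by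
        have h := PySem.List.pyRange_one_succ_right (a := 1) (b := (n : Int) + 1) (by omega)
        push_cast
        push_cast at h
        convert h using 2
      rw [hrange, List.foldl_append]
      simp only [List.foldl]
      have hcast : ((n + 1 : Nat) : Int) = (n : Int) + 1 := by push_cast; ring
      rw [hcast, mul_comm]

-- ===== VERDICT =====
theorem factorialMod_spec : Claim_equal_factorialMod := by
  intro x mod _ hpre
  have hx : 0 ≤ x := hpre.1
  unfold Spec_factorialMod
  have h := factorialMod_eq_alt_nat x.toNat mod
  rwa [Int.toNat_of_nonneg hx] at h
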